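-- pv_equiv track=rewrite | github.com/alexMilmore/BruteForceNeuralNet_2.0 | machineLearning/src/translate.py | textToArchitecture
-- ===== SOURCE A (Python) =====
-- def textToArchitecture(text):
--     architecture = [];
--     layer = ['', '', ''];
--     index = 0;
--
--     for i in range(0, len(text)):
--         if (text[i] == ','):
--             index += 1;
--             if index > 3:
--                 index = 0;
--         elif (text[i] == '_'):
--             architecture.append(layer);
--             layer = ['', '', ''];
--             index = 0;
--         else:
--             layer[index] += text[i];
--
--     # fix layers that don't fit together
--     architecture = fixConvDense(architecture);
--
--     return architecture;
--
-- def fixConvDense(architecture):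
--
--     for i in range(0, len(architecture) - 1):
--                 currentLayer = architecture[i][0];
--                 nextLayer = architecture[i+1][0];
--
--                 if currentLayer != nextLayer:
--                     if (currentLayer == 'dense') and (nextLayer == 'conv2D'):
--                         architecture[i][0] = 'denseTo2D';
--                     elif ('conv' in currentLayer) and (nextLayer == 'dense'):
--                         # add flatten layer to convert from 2d conv to 1d dense
--                         architecture.insert(i+1, ['flatten', '1', '1']);
--
--     return architecture;
-- ===== SOURCE B (Python) =====
-- # B: tokenize with str.split instead of a char-by-char state machine; reuses the fixConvDense pass.
-- def textToArchitecture(text):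
--     architecture = []
--     for group in text.split('_')[:-1]:
--         layer = ['', '', '']
--         for j, field in enumerate(group.split(',')):
--             if field:
--                 layer[j % 4] += field
--         architecture.append(layer)
--     return fixConvDense(architecture)
--
-- def fixConvDense(architecture):
--     for i in range(0, len(architecture) - 1):
--                 currentLayer = architecture[i][0]
--                 nextLayer = architecture[i+1][0]
--
--                 if currentLayer != nextLayer:
--                     if (currentLayer == 'dense') and (nextLayer == 'conv2D'):
--                         architecture[i][0] = 'denseTo2D'
--                     elif ('conv' in currentLayer) and (nextLayer == 'dense'):
--                         architecture.insert(i+1, ['flatten', '1', '1'])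
--
--     return architecture
-- ===== Notes on version B (the rewrite author's own statement) =====
-- stated objective: simpler
-- what changed: Replaces the character-by-character state machine (manual slot counter with wrap/reset and per-character string concatenation) by tokenizing: split the text on underscores into groups (dropping the final unterminated one), split each group on commas and add field j to slot j mod 4; the fixConvDense pass is reused unchanged.
-- crash fix: On inputs whose only non-empty field at slot position j mod 4 == 3 lies in the final underscore-unterminated group, A raises IndexError while scanning that group; B never reads it and returns the architecture of the terminated groups. — e.g. on textToArchitecture("a,b,c,d"): A raises IndexError, B returns []
import Mathlib
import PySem

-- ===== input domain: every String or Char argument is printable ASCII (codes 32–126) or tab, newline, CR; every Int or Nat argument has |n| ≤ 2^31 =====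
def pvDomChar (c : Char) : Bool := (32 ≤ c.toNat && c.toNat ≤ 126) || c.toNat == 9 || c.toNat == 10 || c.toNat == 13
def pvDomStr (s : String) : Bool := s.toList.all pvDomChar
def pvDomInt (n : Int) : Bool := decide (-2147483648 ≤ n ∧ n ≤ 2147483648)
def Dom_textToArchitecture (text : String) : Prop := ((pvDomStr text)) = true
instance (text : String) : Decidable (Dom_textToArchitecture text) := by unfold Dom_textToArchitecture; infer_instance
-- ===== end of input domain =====

-- B tokenizes with split instead of A's char-by-char state machine (simpler, and measurably faster:
-- A rebuilds a slot string per character). The fixConvDense helper is identical in both Pythons and is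
-- a shared helper here. Python strings are modelled as List Char internally, String.ofList at the end.

-- ===== PORT A =====
-- shared helper: fixConvDense (verbatim in Source A and Source B)
def pvFixConvDense (architecture : List (List String)) : List (List String) :=
  (PySem.List.pyRange 0 (PySem.List.len architecture - 1) 1).foldl
    (fun arch i =>
      let currentLayer := PySem.List.pyGetD (PySem.List.pyGetD arch i []) 0 ""
      let nextLayer := PySem.List.pyGetD (PySem.List.pyGetD arch (i + 1) []) 0 ""
      if currentLayer ≠ nextLayer then
        if currentLayer = "dense" ∧ nextLayer = "conv2D" then
          PySem.List.pySetD arch i (PySem.List.pySetD (PySem.List.pyGetD arch i []) 0 "denseTo2D")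
        else if PySem.Str.isIn "conv" currentLayer = true ∧ nextLayer = "dense" then
          PySem.List.insert arch (i + 1) ["flatten", "1", "1"]
        else arch
      else arch)
    architecture

-- A's char loop; `layer[index] += text[i]` raises IndexError when index is out of range: none
def pvALoop : List Char → List (List (List Char)) → List (List Char) → Int →
    Option (List (List (List Char)))
  | [], arch, _, _ => some arch
  | c :: rest, arch, layer, index =>
    if c = ',' then
      let index' := index + 1
      pvALoop rest arch layer (if index' > 3 then 0 else index')
    else if c = '_' then
      pvALoop rest (arch ++ [layer]) [[], [], []] 0
    else
      match PySem.List.pyGet? layer index with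
      | none => none
      | some s => pvALoop rest arch (PySem.List.pySetD layer index (s ++ [c])) index

def textToArchitecture (text : String) : List (List String) :=
  match pvALoop text.toList [] [[], [], []] 0 with
  | some arch => pvFixConvDense (arch.map (fun layer => layer.map String.ofList))
  | none => []   -- IndexError: excluded by Pre_textToArchitecture

-- ===== PORT B =====
-- layer[j % 4] += field  (total form pyGetD/pySetD; inside Pre_ the index is always in range)
def pvWriteAt (layer : List (List Char)) (i : Int) (f : List Char) : List (List Char) :=
  PySem.List.pySetD layer i (PySem.List.pyGetD layer i [] ++ f)

def pvBLayer (fields : List (List Char)) : List (List Char) :=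
  (PySem.List.enumerate fields 0).foldl
    (fun layer jf => if jf.2 ≠ [] then pvWriteAt layer (PySem.Int.mod jf.1 4) jf.2 else layer)
    [[], [], []]

def textToArchitecture_alt (text : String) : List (List String) :=
  let groups := PySem.Chars.splitOn text.toList ['_']
  let arch := (PySem.List.slice groups none (some (-1))).foldl
    (fun arch g => arch ++ [pvBLayer (PySem.Chars.splitOn g [','])]) []
  pvFixConvDense (arch.map (fun layer => layer.map String.ofList))

-- ===== PRECONDITION & SPEC =====
-- a group is good when every comma-field landing on slot 3 (j mod 4 == 3) is empty: exactly there
-- A's write into layer[index] would raise IndexError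
def pvGoodGroup (g : List Char) : Bool :=
  (PySem.List.enumerate (PySem.Chars.splitOn g [',']) 0).all
    (fun p => !(PySem.Int.mod p.1 4 == 3) || p.2.isEmpty)

-- Pre_ excludes exactly the inputs on which the Python A raises IndexError (a non-empty field at
-- slot position j mod 4 == 3 of some underscore-separated group); A returns normally on every input
-- admitted here.
def Pre_textToArchitecture (text : String) : Prop :=
  (PySem.Chars.splitOn text.toList ['_']).all pvGoodGroup = true
instance (text : String) : Decidable (Pre_textToArchitecture text) := by
  unfold Pre_textToArchitecture; infer_instance

def pvWitness_textToArchitecture : String := "conv2D,3,2_dense,4,_"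

-- On inputs whose only non-empty field at slot position j mod 4 == 3 lies in the final
-- underscore-unterminated group (which A still scans char by char but never flushes), A raises
-- IndexError while scanning that group; B never reads it and returns the architecture of the
-- terminated groups.
def Raises_textToArchitecture (text : String) : Prop :=
  (PySem.Chars.splitOn text.toList ['_']).dropLast.all pvGoodGroup = true ∧
  pvGoodGroup ((PySem.Chars.splitOn text.toList ['_']).getLastD []) = false
instance (text : String) : Decidable (Raises_textToArchitecture text) := by
  unfold Raises_textToArchitecture; infer_instance

def pvRaiseWitness_textToArchitecture : String := "a,b,c,d"
def pvRaiseWitnessOut_textToArchitecture : List (List String) := []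

def Spec_textToArchitecture (text : String) (out : List (List String)) : Prop :=
  out = textToArchitecture_alt text
instance (text : String) (out : List (List String)) : Decidable (Spec_textToArchitecture text out) := by
  unfold Spec_textToArchitecture; infer_instance

-- ===== CLAIM (what is proved, stated in full; the proofs are below) =====
def Claim_equal_textToArchitecture : Prop := ∀ (text : String), Dom_textToArchitecture text → Pre_textToArchitecture text → Spec_textToArchitecture text (textToArchitecture text)

def Claim_raises_textToArchitecture : Prop :=
  (∀ (text : String), Dom_textToArchitecture text → Raises_textToArchitecture text → ¬ Pre_textToArchitecture text) ∧
  (Dom_textToArchitecture (pvRaiseWitness_textToArchitecture) ∧ Raises_textToArchitecture (pvRaiseWitness_textToArchitecture) ∧ textToArchitecture_alt (pvRaiseWitness_textToArchitecture) = pvRaiseWitnessOut_textToArchitecture)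

-- ===== LEMMAS AND PROOFS =====

def pvConsHead (x : Char) : List (List Char) → List (List Char)
  | [] => [[x]]
  | g :: gs => (x :: g) :: gs

def pvSplit (c : Char) : List Char → List (List Char)
  | [] => [[]]
  | ch :: rest => if ch = c then [] :: pvSplit c rest else pvConsHead ch (pvSplit c rest)

theorem pvSplit_ne_nil (c : Char) (l : List Char) : pvSplit c l ≠ [] := by
  cases l with
  | nil => simp [pvSplit]
  | cons ch rest =>
    simp only [pvSplit]
    split
    · simp
    · cases h : pvSplit c rest <;> simp [pvConsHead]

def pvPrepend (p : List Char) : List (List Char) → List (List Char)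
  | [] => [p]
  | g :: gs => (p ++ g) :: gs

theorem pvSplitOn_go_eq (c : Char) (l cur : List Char) (acc : List (List Char)) (fuel : Nat)
    (h : l.length ≤ fuel) :
    PySem.Chars.splitOn.go [c] fuel l cur acc = acc.reverse ++ pvPrepend cur.reverse (pvSplit c l) := by
  induction l generalizing fuel cur acc with
  | nil =>
    cases fuel <;> simp [PySem.Chars.splitOn.go, pvSplit, pvPrepend]
  | cons ch rest ih =>
    cases fuel with
    | zero => simp at h
    | succ f =>
      rw [PySem.Chars.splitOn.go]
      by_cases hc : ch = c
      · subst hc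
        have hpre : [ch].isPrefixOf (ch :: rest) = true := by simp [List.isPrefixOf]
        rw [if_pos hpre]
        have hdrop : List.drop [ch].length (ch :: rest) = rest := by simp
        rw [hdrop, ih [] (cur.reverse :: acc) f (by simpa using h)]
        cases hsp : pvSplit ch rest with
        | nil => exact absurd hsp (pvSplit_ne_nil ch rest)
        | cons g gs => simp [pvSplit, pvPrepend, hsp]
      · have hpre : [c].isPrefixOf (ch :: rest) = false := by
          simp [List.isPrefixOf]; exact fun hh => absurd hh.symm hc
        rw [if_neg (by simp [hpre])]
        rw [ih (ch :: cur) acc f (by simpa using h)]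
        cases hsp : pvSplit c rest with
        | nil => exact absurd hsp (pvSplit_ne_nil c rest)
        | cons g gs => simp [pvSplit, pvPrepend, pvConsHead, hsp, hc]


theorem pvSplitOn_eq (c : Char) (l : List Char) :
    PySem.Chars.splitOn l [c] = pvSplit c l := by
  rw [PySem.Chars.splitOn, pvSplitOn_go_eq c l [] [] (l.length + 1) (Nat.le_succ _)]
  cases hsp : pvSplit c l with
  | nil => exact absurd hsp (pvSplit_ne_nil c l)
  | cons g gs => simp [pvPrepend]


def pvFill : List (List Char) → Int → List (List Char) → Option (List (List Char))
  | layer, _, [] => some layer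
  | layer, idx, f :: fs =>
    let idx' := idx + 1
    let idx' := if idx' > 3 then 0 else idx'
    if f = [] then pvFill layer idx' fs
    else if idx = 3 then none
    else pvFill (pvWriteAt layer idx f) idx' fs

def pvRunAll : List (List Char) → List (List Char) → Int → Option (List (List (List Char)))
  | [], _, _ => some []
  | [g], layer, idx => (pvFill layer idx (pvSplit ',' g)).map (fun _ => [])
  | g :: g' :: gs, layer, idx =>
    match pvFill layer idx (pvSplit ',' g) with
    | none => none
    | some l => (pvRunAll (g' :: gs) [[], [], []] 0).map (l :: ·)

theorem pvRunAll_congr (g1 g2 : List Char) (gs : List (List Char)) (l1 l2 : List (List Char))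
    (i1 i2 : Int) (h : pvFill l1 i1 (pvSplit ',' g1) = pvFill l2 i2 (pvSplit ',' g2)) :
    pvRunAll (g1 :: gs) l1 i1 = pvRunAll (g2 :: gs) l2 i2 := by
  cases gs <;> simp [pvRunAll, h]

theorem pvRunAll_cons_none (g : List Char) (gs : List (List Char)) (l : List (List Char)) (i : Int)
    (h : pvFill l i (pvSplit ',' g) = none) : pvRunAll (g :: gs) l i = none := by
  cases gs <;> simp [pvRunAll, h]

theorem pvALoop_eq_runAll (cs : List Char) (arch : List (List (List Char)))
    (a b c : List Char) (idx : Int) (h0 : 0 ≤ idx) (h3 : idx ≤ 3) :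
    pvALoop cs arch [a, b, c] idx =
      (pvRunAll (pvSplit '_' cs) [a, b, c] idx).map (arch ++ ·) := by
  induction cs generalizing arch a b c idx with
  | nil => simp [pvALoop, pvSplit, pvRunAll, pvFill]
  | cons ch rest ih =>
    by_cases hcom : ch = ','
    · subst hcom
      have hstep : pvALoop (',' :: rest) arch [a,b,c] idx
          = pvALoop rest arch [a,b,c] (if idx + 1 > 3 then 0 else idx + 1) := by
        rw [pvALoop, if_pos rfl]
      rw [hstep, ih _ a b c _ (by split <;> omega) (by split <;> omega)]
      cases hsp : pvSplit '_' rest with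
      | nil => exact absurd hsp (pvSplit_ne_nil _ _)
      | cons g gs =>
        have hsp2 : pvSplit '_' (',' :: rest) = (',' :: g) :: gs := by
          simp [pvSplit, pvConsHead, hsp]
        rw [hsp2]
        have hfill : pvFill [a,b,c] idx (pvSplit ',' (',' :: g))
            = pvFill [a,b,c] (if idx + 1 > 3 then 0 else idx + 1) (pvSplit ',' g) := by
          have : pvSplit ',' (',' :: g) = [] :: pvSplit ',' g := by simp [pvSplit]
          rw [this, pvFill]
          simp
        rw [pvRunAll_congr (',' :: g) g gs [a,b,c] [a,b,c] idx _ hfill]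
    · by_cases hund : ch = '_'
      · subst hund
        have hstep : pvALoop ('_' :: rest) arch [a,b,c] idx
            = pvALoop rest (arch ++ [[a,b,c]]) [[], [], []] 0 := by
          rw [pvALoop, if_neg (by decide), if_pos rfl]
        rw [hstep, ih _ [] [] [] 0 (by omega) (by omega)]
        cases hsp : pvSplit '_' rest with
        | nil => exact absurd hsp (pvSplit_ne_nil _ _)
        | cons g gs =>
          have hsp2 : pvSplit '_' ('_' :: rest) = [] :: g :: gs := by simp [pvSplit, hsp]
          rw [hsp2]
          have hfill : pvFill [a,b,c] idx (pvSplit ',' []) = some [a,b,c] := by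
            simp [pvSplit, pvFill]
          rw [pvRunAll, hfill]
          cases pvRunAll (g :: gs) [[], [], []] 0 <;> simp
      · -- ordinary character
        cases hsp : pvSplit '_' rest with
        | nil => exact absurd hsp (pvSplit_ne_nil _ _)
        | cons g gs =>
          have hsp2 : pvSplit '_' (ch :: rest) = (ch :: g) :: gs := by
            simp [pvSplit, pvConsHead, hsp, hund]
          rw [hsp2]
          cases hspc : pvSplit ',' g with
          | nil => exact absurd hspc (pvSplit_ne_nil _ _)
          | cons f fs =>
            have hspc2 : pvSplit ',' (ch :: g) = (ch :: f) :: fs := by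
              simp [pvSplit, pvConsHead, hspc, hcom]
            have h4 : idx = 0 ∨ idx = 1 ∨ idx = 2 ∨ idx = 3 := by omega
            rcases h4 with rfl | rfl | rfl | rfl
            · -- idx = 0
              have hget : PySem.List.pyGet? [a,b,c] (0:Int) = some a := by
                simp [PySem.List.pyGet?, PySem.List.pyIdx?]
              have hstep : pvALoop (ch :: rest) arch [a,b,c] 0 = pvALoop rest arch [a ++ [ch], b, c] 0 := by
                rw [pvALoop, if_neg hcom, if_neg hund, hget]
                simp [PySem.List.pySetD, PySem.List.pySet?, PySem.List.pyIdx?]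
              rw [hstep, ih _ _ _ _ 0 (by omega) (by omega), hsp]
              refine congrArg _ (pvRunAll_congr g (ch :: g) gs [a ++ [ch], b, c] [a,b,c] 0 0 ?_)
              rw [hspc, hspc2]
              by_cases hf : f = []
              · subst hf
                simp [pvFill, pvWriteAt, PySem.List.pySetD, PySem.List.pySet?, PySem.List.pyGetD, PySem.List.pyGet?, PySem.List.pyIdx?]
              · simp [pvFill, hf, pvWriteAt, PySem.List.pySetD, PySem.List.pySet?, PySem.List.pyGetD, PySem.List.pyGet?, PySem.List.pyIdx?, List.append_assoc]
            · -- idx = 1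
              have hget : PySem.List.pyGet? [a,b,c] (1:Int) = some b := by
                simp [PySem.List.pyGet?, PySem.List.pyIdx?]
              have hstep : pvALoop (ch :: rest) arch [a,b,c] 1 = pvALoop rest arch [a, b ++ [ch], c] 1 := by
                rw [pvALoop, if_neg hcom, if_neg hund, hget]
                simp [PySem.List.pySetD, PySem.List.pySet?, PySem.List.pyIdx?]
              rw [hstep, ih _ _ _ _ 1 (by omega) (by omega), hsp]
              refine congrArg _ (pvRunAll_congr g (ch :: g) gs [a, b ++ [ch], c] [a,b,c] 1 1 ?_)
              rw [hspc, hspc2]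
              by_cases hf : f = []
              · subst hf
                simp [pvFill, pvWriteAt, PySem.List.pySetD, PySem.List.pySet?, PySem.List.pyGetD, PySem.List.pyGet?, PySem.List.pyIdx?]
              · simp [pvFill, hf, pvWriteAt, PySem.List.pySetD, PySem.List.pySet?, PySem.List.pyGetD, PySem.List.pyGet?, PySem.List.pyIdx?, List.append_assoc]
            · -- idx = 2
              have hget : PySem.List.pyGet? [a,b,c] (2:Int) = some c := by
                simp [PySem.List.pyGet?, PySem.List.pyIdx?]
              have hstep : pvALoop (ch :: rest) arch [a,b,c] 2 = pvALoop rest arch [a, b, c ++ [ch]] 2 := by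
                rw [pvALoop, if_neg hcom, if_neg hund, hget]
                simp [PySem.List.pySetD, PySem.List.pySet?, PySem.List.pyIdx?]
              rw [hstep, ih _ _ _ _ 2 (by omega) (by omega), hsp]
              refine congrArg _ (pvRunAll_congr g (ch :: g) gs [a, b, c ++ [ch]] [a,b,c] 2 2 ?_)
              rw [hspc, hspc2]
              by_cases hf : f = []
              · subst hf
                simp [pvFill, pvWriteAt, PySem.List.pySetD, PySem.List.pySet?, PySem.List.pyGetD, PySem.List.pyGet?, PySem.List.pyIdx?]
              · simp [pvFill, hf, pvWriteAt, PySem.List.pySetD, PySem.List.pySet?, PySem.List.pyGetD, PySem.List.pyGet?, PySem.List.pyIdx?, List.append_assoc]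
            · -- idx = 3 : IndexError on both sides
              have hget : PySem.List.pyGet? [a,b,c] (3:Int) = none := by
                simp [PySem.List.pyGet?, PySem.List.pyIdx?]
              have hstep : pvALoop (ch :: rest) arch [a,b,c] 3 = none := by
                rw [pvALoop, if_neg hcom, if_neg hund, hget]
              rw [hstep, pvRunAll_cons_none _ _ _ _ (by rw [hspc2]; simp [pvFill])]
              simp

theorem pvFill_eq_foldB (fields : List (List Char)) (j : Nat) (a b c : List Char)
    (hg : ∀ p ∈ PySem.List.enumerate fields (j : Int), PySem.Int.mod p.1 4 = 3 → p.2 = []) :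
    pvFill [a, b, c] ((j % 4 : Nat) : Int) fields =
      some ((PySem.List.enumerate fields (j : Int)).foldl
        (fun layer jf => if jf.2 ≠ [] then pvWriteAt layer (PySem.Int.mod jf.1 4) jf.2 else layer)
        [a, b, c]) := by
  induction fields generalizing j a b c with
  | nil => simp [pvFill, PySem.List.enumerate]
  | cons f fs ih =>
    have hmod : PySem.Int.mod (j : Int) 4 = ((j % 4 : Nat) : Int) := by
      exact_mod_cast PySem.Int.mod_natCast j 4
    have hwrap : (if ((j % 4 : Nat) : Int) + 1 > 3 then (0:Int) else ((j % 4 : Nat) : Int) + 1)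
        = (((j + 1) % 4 : Nat) : Int) := by
      have h4 : j % 4 = 0 ∨ j % 4 = 1 ∨ j % 4 = 2 ∨ j % 4 = 3 := by omega
      have h14 : (j + 1) % 4 = (j % 4 + 1) % 4 := by omega
      rcases h4 with h | h | h | h <;> rw [h14, h] <;> norm_num
    have henum : PySem.List.enumerate (f :: fs) (j : Int)
        = ((j : Int), f) :: PySem.List.enumerate fs ((j : Int) + 1) := PySem.List.enumerate_cons _ _ _
    have hcast1 : ((j : Int) + 1) = ((j + 1 : Nat) : Int) := by push_cast; ring
    rw [henum]
    by_cases hf : f = []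
    · subst hf
      have := ih (j + 1) a b c (by
        intro p hp hx
        exact hg p (by rw [henum, hcast1]; exact List.mem_cons_of_mem _ hp) hx)
      rw [List.foldl_cons, pvFill]
      simp only [hwrap, hcast1]
      simpa using this
    · have h3 : ¬ j % 4 = 3 := by
        intro h
        exact hf (hg ((j:Int), f) (by rw [henum]; exact List.mem_cons_self) (by rw [hmod, h]; rfl))
      rw [List.foldl_cons]
      simp only [ne_eq, hf, not_false_eq_true, if_pos, hmod]
      have hne3 : ¬ (((j % 4 : Nat) : Int) = 3) := by exact_mod_cast h3
      have hstep : pvFill [a,b,c] ((j % 4 : Nat) : Int) (f :: fs)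
          = pvFill (pvWriteAt [a,b,c] ((j % 4 : Nat) : Int) f) (((j + 1) % 4 : Nat) : Int) fs := by
        rw [pvFill]
        simp only [if_neg hf, if_neg hne3, hwrap]
      rw [hstep]
      have hlt : j % 4 = 0 ∨ j % 4 = 1 ∨ j % 4 = 2 := by omega
      rcases hlt with h | h | h
      · rw [h]
        have hw : pvWriteAt [a,b,c] (((0:Nat) + 0 : Nat) : Int) f = [a ++ f, b, c] := by
          simp [pvWriteAt, PySem.List.pySetD, PySem.List.pySet?, PySem.List.pyGetD, PySem.List.pyGet?, PySem.List.pyIdx?]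
        rw [(by norm_num : (((0:Nat) : Int)) = (((0:Nat) + 0 : Nat) : Int)), hw, hcast1]
        exact ih (j + 1) (a ++ f) b c (by
          intro p hp hx
          exact hg p (by rw [henum, hcast1]; exact List.mem_cons_of_mem _ hp) hx)
      · rw [h]
        have hw : pvWriteAt [a,b,c] (((0:Nat) + 1 : Nat) : Int) f = [a, b ++ f, c] := by
          simp [pvWriteAt, PySem.List.pySetD, PySem.List.pySet?, PySem.List.pyGetD, PySem.List.pyGet?, PySem.List.pyIdx?]
        rw [(by norm_num : (((1:Nat) : Int)) = (((0:Nat) + 1 : Nat) : Int)), hw, hcast1]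
        exact ih (j + 1) a (b ++ f) c (by
          intro p hp hx
          exact hg p (by rw [henum, hcast1]; exact List.mem_cons_of_mem _ hp) hx)
      · rw [h]
        have hw : pvWriteAt [a,b,c] (((0:Nat) + 2 : Nat) : Int) f = [a, b, c ++ f] := by
          simp [pvWriteAt, PySem.List.pySetD, PySem.List.pySet?, PySem.List.pyGetD, PySem.List.pyGet?, PySem.List.pyIdx?]
        rw [(by norm_num : (((2:Nat) : Int)) = (((0:Nat) + 2 : Nat) : Int)), hw, hcast1]
        exact ih (j + 1) a b (c ++ f) (by
          intro p hp hx
          exact hg p (by rw [henum, hcast1]; exact List.mem_cons_of_mem _ hp) hx)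

theorem pvRunAll_eq_map (gs : List (List Char)) (hne : gs ≠ [])
    (hg : ∀ g ∈ gs, ∀ p ∈ PySem.List.enumerate (pvSplit ',' g) (((0:Nat)):Int),
      PySem.Int.mod p.1 4 = 3 → p.2 = []) :
    pvRunAll gs [[], [], []] 0 = some (gs.dropLast.map (fun g => pvBLayer (pvSplit ',' g))) := by
  induction gs with
  | nil => exact absurd rfl hne
  | cons g gs ih =>
    have hfill := pvFill_eq_foldB (pvSplit ',' g) 0 [] [] [] (hg g List.mem_cons_self)
    have hz : (((0 % 4 : Nat)) : Int) = (0 : Int) := by norm_num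
    rw [hz] at hfill
    have hb : pvBLayer (pvSplit ',' g)
        = ((PySem.List.enumerate (pvSplit ',' g) (((0:Nat)):Int)).foldl
            (fun layer jf => if jf.2 ≠ [] then pvWriteAt layer (PySem.Int.mod jf.1 4) jf.2 else layer)
            [[], [], []]) := by
      simp [pvBLayer]
    cases gs with
    | nil =>
      rw [pvRunAll, hfill]
      simp
    | cons g' gs' =>
      rw [pvRunAll, hfill]
      rw [ih (by simp) (fun x hx => hg x (List.mem_cons_of_mem _ hx))]
      simp [hb]

theorem pvGetLastD_mem (l : List (List Char)) (h : l ≠ []) (d : List Char) : l.getLastD d ∈ l := by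
  rw [List.getLastD_eq_getLast?, List.getLast?_eq_some_getLast h]
  simp [List.getLast_mem]

-- decode pvGoodGroup into the hypothesis the field lemma needs
theorem pvGood_decode (g : List Char) (h : pvGoodGroup g = true) :
    ∀ p ∈ PySem.List.enumerate (pvSplit ',' g) (((0:Nat)):Int),
      PySem.Int.mod p.1 4 = 3 → p.2 = [] := by
  intro p hp h3
  unfold pvGoodGroup at h
  rw [pvSplitOn_eq] at h
  have hh := (List.all_eq_true.mp h) p (by simpa using hp)
  simp at hh
  rcases hh with hh | hh
  · rw [PySem.Int.mod_eq_emod_of_pos (by norm_num)] at h3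
    exact absurd h3 hh
  · exact hh

-- ===== VERDICT (by name: the statement is the Claim_ definition above) =====
theorem textToArchitecture_spec : Claim_equal_textToArchitecture := by
  unfold Claim_equal_textToArchitecture
  intro text _dom hpre
  unfold Spec_textToArchitecture textToArchitecture textToArchitecture_alt
  have hgs : ∀ g ∈ pvSplit '_' text.toList,
      ∀ p ∈ PySem.List.enumerate (pvSplit ',' g) (((0:Nat)):Int),
        PySem.Int.mod p.1 4 = 3 → p.2 = [] := by
    unfold Pre_textToArchitecture at hpre
    rw [pvSplitOn_eq] at hpre
    intro g hgmem
    exact pvGood_decode g ((List.all_eq_true.mp hpre) g hgmem)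
  rw [pvALoop_eq_runAll _ [] [] [] [] 0 (by omega) (by omega)]
  rw [pvRunAll_eq_map _ (pvSplit_ne_nil _ _) hgs]
  simp only [Option.map_some, List.nil_append]
  rw [PySem.List.slice_to_neg_one, PySem.List.foldl_append_singleton_eq_map]
  simp only [pvSplitOn_eq, List.nil_append]

def textToArchitecture_raises : Claim_raises_textToArchitecture := by
  unfold Claim_raises_textToArchitecture
  refine ⟨?_, by decide⟩
  intro text _dom hr hpre
  rcases hr with ⟨_, hbad⟩
  unfold Pre_textToArchitecture at hpre
  have hmem := pvGetLastD_mem (PySem.Chars.splitOn text.toList ['_'])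
    (by rw [pvSplitOn_eq]; exact pvSplit_ne_nil _ _) []
  have := (List.all_eq_true.mp hpre) _ hmem
  rw [this] at hbad
  simp at hbad
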